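-- pv_equiv track=rewrite | github.com/Dayof/TABLEAUX-FroCoS-ITP | etl/etl_itp.py | sep_reg
-- ===== SOURCE A (Python) =====
-- def find_all_name(name):
--     temp_f_name, temp_l_name = ('', '')
--     all_name = name.split(' ')
--     for i in all_name:
--         if i.isupper():
--             temp_l_name += i + ' '
--         else:
--             temp_f_name += i + ' '
--
--     return (temp_f_name, temp_l_name)
--
-- def find_aff(regs):
--     aff, add, loc = ('', '', 0)
--
--     all_aff = ['Department', 'University' , 'Institute', 'Laboratory', 'Universitá', 'Ecole', 'Dipartimento', 'Institut', 'Universität',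
--     'School', 'Informat', 'Science', 'Microsoft', 'Engineering', 'Intel',
--     'College', 'Inc.', 'Research', 'Universit', 'Rech']
--
--     for i in range(len(regs)):
--         for j in all_aff:
--             if j in regs[i]:
--                 aff += str(regs[i]) + ' '
--                 loc = i
--                 break
--
--     for i in regs[loc+1:]:
--         add += str(i) + ' '
--
--     return (aff, add)
--
-- def sep_reg(list_regs):
--     all_reg, new_reg, v_reg, l_name = ([], [], {}, '')
--
--     for i in list_regs:
--         if i == '\n':
--             if new_reg:
--                 v_reg = {'BASE' : 'itp', 'F_NAME' : '', 'M_NAME' : '',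
--                         'L_NAME' : '', 'TITLE' : '', 'EMAIL' : '',
--                         'AFFILIATION' : '', 'ADDRESS' : ''}
--                 l_name, r_name = ('', [])
--
--                 all_name = find_all_name(new_reg[0])
--
--                 v_reg['F_NAME'] = all_name[0]
--                 v_reg['L_NAME'] = all_name[1]
--
--                 aff_add = find_aff(new_reg[1:])
--
--                 v_reg['AFFILIATION'] = aff_add[0]
--                 v_reg['ADDRESS'] = aff_add[1]
--
--                 all_reg.append(v_reg)
--                 new_reg = []
--         else:
--             new_reg.append(i.strip())
--     return all_reg
-- ===== SOURCE B (Python) =====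
-- ALL_AFF = ['Department', 'University', 'Institute', 'Laboratory', 'Universitá', 'Ecole',
--            'Dipartimento', 'Institut', 'Universität', 'School', 'Informat', 'Science',
--            'Microsoft', 'Engineering', 'Intel', 'College', 'Inc.', 'Research', 'Universit', 'Rech']
--
--
-- def find_all_name(name):
--     parts = name.split(' ')
--     f_name = ''.join(p + ' ' for p in parts if not p.isupper())
--     l_name = ''.join(p + ' ' for p in parts if p.isupper())
--     return (f_name, l_name)
--
--
-- def find_aff(regs):
--     hits = [(i, r) for i, r in enumerate(regs) if any(k in r for k in ALL_AFF)]
--     aff = ''.join(r + ' ' for _, r in hits)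
--     loc = hits[-1][0] if hits else 0
--     add = ''.join(r + ' ' for r in regs[loc + 1:])
--     return (aff, add)
--
--
-- def make_record(group):
--     f_name, l_name = find_all_name(group[0])
--     aff, add = find_aff(group[1:])
--     return {'BASE': 'itp', 'F_NAME': f_name, 'M_NAME': '', 'L_NAME': l_name,
--             'TITLE': '', 'EMAIL': '', 'AFFILIATION': aff, 'ADDRESS': add}
--
--
-- def sep_reg(list_regs):
--     # phase 1: cut the token list into '\n'-terminated groups of stripped tokens
--     groups = []
--     rest = list_regs
--     while '\n' in rest:
--         i = rest.index('\n')
--         if i: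
--             groups.append([t.strip() for t in rest[:i]])
--         rest = rest[i + 1:]
--     # phase 2: map each group to its record
--     return [make_record(g) for g in groups]
-- ===== Notes on version B (the rewrite author's own statement) =====
-- stated objective: alternative
-- what changed: A's single stateful accumulate-and-flush loop (with dict mutation inside it) is replaced by a two-phase shape: first cut the token list into '\n'-terminated groups of stripped tokens, then map each group to its record, with the name/affiliation helpers rewritten as str.join over filtered comprehensions of an enumerated list instead of repeated '+=' string-accumulator loops.
import Mathlib
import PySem

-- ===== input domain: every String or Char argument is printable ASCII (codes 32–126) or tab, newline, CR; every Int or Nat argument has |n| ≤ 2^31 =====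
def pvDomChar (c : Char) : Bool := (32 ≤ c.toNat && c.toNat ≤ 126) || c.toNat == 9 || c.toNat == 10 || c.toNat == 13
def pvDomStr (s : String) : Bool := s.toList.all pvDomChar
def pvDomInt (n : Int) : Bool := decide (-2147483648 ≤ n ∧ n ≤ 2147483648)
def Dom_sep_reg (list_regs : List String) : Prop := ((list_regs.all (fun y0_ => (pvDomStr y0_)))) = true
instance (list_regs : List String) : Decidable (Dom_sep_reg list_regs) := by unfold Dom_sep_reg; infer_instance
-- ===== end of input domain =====

-- B regroups A's single stateful flush-loop into a two-phase shape (cut the token list into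
-- '\n'-terminated groups, then map each group to its record); same values (objective: alternative).

-- shared primitive: Python str.isupper() — at least one cased character and no lowercase one
-- (exact on the ASCII domain; PySem has no string-level isupper)
def pyStrIsupper (s : String) : Bool :=
  s.toList.any (fun c => PySem.Chars.isupper c || PySem.Chars.islower c) &&
  s.toList.all (fun c => !PySem.Chars.islower c)

-- the all_aff keyword list (identical literal in Source A and Source B)
def pvAllAff : List String :=
  ["Department", "University", "Institute", "Laboratory", "Universitá", "Ecole",
   "Dipartimento", "Institut", "Universität", "School", "Informat", "Science",
   "Microsoft", "Engineering", "Intel", "College", "Inc.", "Research", "Universit", "Rech"]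

-- ===== PORT A =====

def find_all_name_A (name : String) : String × String :=
  ((PySem.Str.split? name " ").getD []).foldl
    (fun (st : String × String) i =>
      if pyStrIsupper i then (st.1, st.2 ++ i ++ " ") else (st.1 ++ i ++ " ", st.2))
    ("", "")

-- inner 'for j in all_aff: if j in regs[i]: …; break' runs its body exactly once, at the first
-- matching keyword, and the body does not depend on which keyword matched: encoded as an any-test
def find_aff_A (regs : List String) : String × String :=
  let st := (PySem.List.pyRange 0 (PySem.List.len regs)).foldl
    (fun (st : String × Int) i =>
      if pvAllAff.any (fun j => PySem.Str.isIn j (PySem.List.pyGetD regs i "")) then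
        (st.1 ++ PySem.List.pyGetD regs i "" ++ " ", i)
      else st)
    ("", 0)
  let add := (PySem.List.slice regs (some (st.2 + 1)) none).foldl (fun a i => a ++ i ++ " ") ""
  (st.1, add)

def mk_v_reg_A (new_reg : List String) : PySem.Dict String String :=
  -- new_reg[0]: the caller's branch guarantees new_reg ≠ [], so the default is never used
  let all_name := find_all_name_A (PySem.List.pyGetD new_reg 0 "")
  let aff_add := find_aff_A (PySem.List.slice new_reg (some 1) none)
  ((((((((((((PySem.Dict.empty.insert "BASE" "itp").insert "F_NAME" "").insert "M_NAME" "").insert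
      "L_NAME" "").insert "TITLE" "").insert "EMAIL" "").insert "AFFILIATION" "").insert
      "ADDRESS" "").insert "F_NAME" all_name.1).insert "L_NAME" all_name.2).insert
      "AFFILIATION" aff_add.1).insert "ADDRESS" aff_add.2)

-- the loop body of A's for-loop over list_regs (state: (all_reg, new_reg))
def sep_reg_step (st : List (PySem.Dict String String) × List String) (i : String) :
    List (PySem.Dict String String) × List String :=
  if i = "\n" then
    if st.2 ≠ [] then (st.1 ++ [mk_v_reg_A st.2], ([] : List String)) else st
  else (st.1, st.2 ++ [PySem.Str.strip i])

def sep_reg (list_regs : List String) : List (List (String × String)) :=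
  (list_regs.foldl sep_reg_step ([], [])).1.map
    PySem.Dict.items   -- dict → association list at the output boundary (type convention)

-- ===== PORT B =====

def find_all_name_B (name : String) : String × String :=
  let parts := (PySem.Str.split? name " ").getD []
  (PySem.Str.join "" ((parts.filter (fun p => !pyStrIsupper p)).map (fun p => p ++ " ")),
   PySem.Str.join "" ((parts.filter (fun p => pyStrIsupper p)).map (fun p => p ++ " ")))

def find_aff_B (regs : List String) : String × String :=
  let hits := (PySem.List.enumerate regs).filter (fun p => pvAllAff.any (fun k => PySem.Str.isIn k p.2))
  let aff := PySem.Str.join "" (hits.map (fun p => p.2 ++ " "))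
  let loc : Int := match hits.getLast? with | some p => p.1 | none => 0
  let add := PySem.Str.join "" ((PySem.List.slice regs (some (loc + 1)) none).map (fun r => r ++ " "))
  (aff, add)

def make_record_B (g : List String) : List (String × String) :=
  -- g[0]: altLoop only emits non-empty groups, so the default is never used
  let nm := find_all_name_B (PySem.List.pyGetD g 0 "")
  let aa := find_aff_B (PySem.List.slice g (some 1) none)
  [("BASE", "itp"), ("F_NAME", nm.1), ("M_NAME", ""), ("L_NAME", nm.2),
   ("TITLE", ""), ("EMAIL", ""), ("AFFILIATION", aa.1), ("ADDRESS", aa.2)]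

-- phase 1 of Source B: the while-loop cutting the token list into '\n'-terminated stripped groups
def altLoop (groups : List (List String)) (rest : List String) : List (List String) :=
  if h : "\n" ∈ rest then
    let i := rest.idxOf "\n"
    altLoop (if i ≠ 0 then groups ++ [(rest.take i).map PySem.Str.strip] else groups)
      (rest.drop (i + 1))
  else groups
termination_by rest.length
decreasing_by
  have h1 := List.ne_nil_of_mem h
  have : 0 < rest.length := List.length_pos_iff.mpr h1
  simp only [List.length_drop]; omega

def sep_reg_alt (list_regs : List String) : List (List (String × String)) :=
  (altLoop [] list_regs).map make_record_B

-- ===== PRECONDITION & SPEC =====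
def Spec_sep_reg (list_regs : List String) (out : List (List (String × String))) : Prop := out = sep_reg_alt list_regs
instance (list_regs : List String) (out : List (List (String × String))) : Decidable (Spec_sep_reg list_regs out) := by unfold Spec_sep_reg; infer_instance

-- ===== CLAIM (what is proved, stated in full; the proofs are below) =====
def Claim_equal_sep_reg : Prop := ∀ (list_regs : List String), Dom_sep_reg list_regs → Spec_sep_reg list_regs (sep_reg list_regs)

-- ===== LEMMAS AND PROOFS =====

theorem join_empty_cons (x : String) (xs : List String) :
    PySem.Str.join "" (x :: xs) = x ++ PySem.Str.join "" xs := by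
  cases xs with
  | nil =>
    apply String.toList_inj.mp
    simp [PySem.Str.toList_join, PySem.Chars.join_singleton, PySem.Chars.join_nil]
  | cons y r =>
    apply String.toList_inj.mp
    simp [PySem.Str.toList_join, PySem.Chars.join_cons_cons]

theorem foldl_concat (l : List String) (a : String) :
    l.foldl (fun acc p => acc ++ p ++ " ") a = a ++ PySem.Str.join "" (l.map (fun p => p ++ " ")) := by
  induction l generalizing a with
  | nil =>
    rw [show PySem.Str.join "" (List.map (fun p => p ++ " ") []) = "" from rfl,
      String.append_empty]
    rfl
  | cons x xs ih =>
    simp only [List.foldl_cons, List.map_cons, join_empty_cons, ih]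
    apply String.toList_inj.mp; simp

theorem fan_loop (l : List String) :
    ∀ a b : String,
    l.foldl (fun (st : String × String) i =>
        if pyStrIsupper i then (st.1, st.2 ++ i ++ " ") else (st.1 ++ i ++ " ", st.2)) (a, b)
    = (a ++ PySem.Str.join "" ((l.filter (fun p => !pyStrIsupper p)).map (fun p => p ++ " ")),
       b ++ PySem.Str.join "" ((l.filter (fun p => pyStrIsupper p)).map (fun p => p ++ " "))) := by
  induction l with
  | nil =>
    intro a b
    simp only [List.foldl_nil, List.filter_nil, List.map_nil]
    rw [show PySem.Str.join "" ([] : List String) = "" from rfl, String.append_empty,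
      String.append_empty]
  | cons x xs ih =>
    intro a b
    by_cases h : pyStrIsupper x = true <;>
      · simp [h, ih, join_empty_cons, Prod.ext_iff]
        apply String.toList_inj.mp
        simp

theorem find_all_name_eq (name : String) : find_all_name_A name = find_all_name_B name := by
  simp only [find_all_name_A, find_all_name_B]
  rw [fan_loop]
  simp only [Prod.mk.injEq]
  constructor <;> (apply String.toList_inj.mp; simp)

theorem lastCons (x : Int × String) (xs : List (Int × String)) (d : Int) :
    (match (x :: xs).getLast? with | some p => p.1 | none => d)
    = (match xs.getLast? with | some p => p.1 | none => x.1) := by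
  cases xs with
  | nil => rfl
  | cons y r =>
    rw [List.getLast?_cons_cons]
    cases h : (y :: r).getLast? with
    | none => exact absurd (List.getLast?_eq_none_iff.mp h) (by simp)
    | some p => rfl

theorem aff_loop (hit : (Int × String) → Bool) (l : List (Int × String)) :
    ∀ (a : String) (loc0 : Int),
    l.foldl (fun (st : String × Int) p => if hit p then (st.1 ++ p.2 ++ " ", p.1) else st) (a, loc0)
    = (a ++ PySem.Str.join "" ((l.filter hit).map (fun p => p.2 ++ " ")),
       match (l.filter hit).getLast? with | some p => p.1 | none => loc0) := by
  induction l with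
  | nil =>
    intro a loc0
    simp only [List.foldl_nil, List.filter_nil, List.map_nil]
    rw [show PySem.Str.join "" ([] : List String) = "" from rfl, String.append_empty]
    rfl
  | cons x xs ih =>
    intro a loc0
    by_cases h : hit x = true
    · simp only [List.foldl_cons, h, if_true, List.filter_cons, ih, List.map_cons]
      rw [join_empty_cons, lastCons]
      simp only [Prod.mk.injEq]
      refine ⟨?_, by trivial⟩
      apply String.toList_inj.mp
      simp
    · simp [h, ih]

theorem find_aff_eq (regs : List String) : find_aff_A regs = find_aff_B regs := by
  simp only [find_aff_A, find_aff_B]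
  rw [show (PySem.List.pyRange 0 (PySem.List.len regs)).foldl
      (fun (st : String × Int) i =>
        if pvAllAff.any (fun j => PySem.Str.isIn j (PySem.List.pyGetD regs i "")) then
          (st.1 ++ PySem.List.pyGetD regs i "" ++ " ", i)
        else st) ("", 0)
      = (PySem.List.enumerate regs).foldl
        (fun (st : String × Int) p =>
          if pvAllAff.any (fun j => PySem.Str.isIn j p.2) then (st.1 ++ p.2 ++ " ", p.1) else st)
        ("", 0) from by
    rw [PySem.List.enumerate_eq_map_pyRange regs "", List.foldl_map]]
  rw [aff_loop]
  simp only [Prod.mk.injEq]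
  refine ⟨by apply String.toList_inj.mp; simp, ?_⟩
  rw [foldl_concat]
  apply String.toList_inj.mp; simp

theorem mk_v_reg_items (g : List String) : (mk_v_reg_A g).items = make_record_B g := by
  simp only [mk_v_reg_A, make_record_B, find_all_name_eq, find_aff_eq]
  simp [PySem.Dict.insert, PySem.Dict.empty]

-- proof-side structural recursion shared by both loop characterisations
def auxG (buf : List String) : List String → List (List String)
  | [] => []
  | x :: xs =>
    if x = "\n" then (if buf = [] then auxG [] xs else buf :: auxG [] xs)
    else auxG (buf ++ [PySem.Str.strip x]) xs

theorem A_loop_char (l : List String) :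
    ∀ (acc : List (PySem.Dict String String)) (buf : List String),
    (l.foldl sep_reg_step (acc, buf)).1 = acc ++ (auxG buf l).map mk_v_reg_A := by
  induction l with
  | nil => intro acc buf; simp [auxG]
  | cons x xs ih =>
    intro acc buf
    rw [List.foldl_cons]
    by_cases hx : x = "\n"
    · by_cases hb : buf = []
      · rw [show sep_reg_step (acc, buf) x = (acc, buf) from by simp [sep_reg_step, hx, hb], ih]
        simp [auxG, hx, hb]
      · rw [show sep_reg_step (acc, buf) x = (acc ++ [mk_v_reg_A buf], []) from by
          simp [sep_reg_step, hx, hb], ih]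
        simp [auxG, hx, hb]
    · rw [show sep_reg_step (acc, buf) x = (acc, buf ++ [PySem.Str.strip x]) from by
        simp [sep_reg_step, hx], ih]
      simp [auxG, hx]

theorem auxG_no_nl (l : List String) (h : "\n" ∉ l) : ∀ buf, auxG buf l = [] := by
  induction l with
  | nil => intro buf; rfl
  | cons x xs ih =>
    intro buf
    have hx : x ≠ "\n" := fun he => h (he ▸ List.mem_cons_self)
    have hxs : "\n" ∉ xs := fun hm => h (List.mem_cons_of_mem _ hm)
    simp [auxG, hx, ih hxs]

theorem auxG_split (pre : List String) (h : "\n" ∉ pre) :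
    ∀ buf suf, auxG buf (pre ++ "\n" :: suf) =
      (if buf ++ pre.map PySem.Str.strip = [] then auxG [] suf
       else (buf ++ pre.map PySem.Str.strip) :: auxG [] suf) := by
  induction pre with
  | nil => intro buf suf; simp [auxG]
  | cons x pre ih =>
    intro buf suf
    have hx : x ≠ "\n" := fun he => h (he ▸ List.mem_cons_self)
    have hpre : "\n" ∉ pre := fun hm => h (List.mem_cons_of_mem _ hm)
    simp only [List.cons_append, auxG, hx, if_false, ih hpre, List.map_cons]
    rw [List.append_cons buf]
    simp

theorem not_nl_take (l : List String) : "\n" ∉ l.take (List.idxOf "\n" l) := by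
  intro hmem
  have hl : "\n" ∈ l := List.mem_of_mem_take hmem
  have := (List.mem_take_iff_idxOf_lt hl).mp hmem
  omega

theorem altLoop_eq (rest : List String) : ∀ gs, altLoop gs rest = gs ++ auxG [] rest := by
  induction hn : rest.length using Nat.strong_induction_on generalizing rest with
  | _ n ihn =>
  intro gs
  rw [altLoop]
  by_cases h : "\n" ∈ rest
  · simp only [h, dif_pos]
    have hlt := List.idxOf_lt_length_of_mem h
    have hget : rest[rest.idxOf "\n"]'hlt = "\n" := List.getElem_idxOf hlt
    have hdec : (rest.drop (rest.idxOf "\n" + 1)).length < n := by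
      simp only [List.length_drop]; omega
    have hsplit : rest = rest.take (rest.idxOf "\n") ++ "\n" :: rest.drop (rest.idxOf "\n" + 1) := by
      conv_lhs => rw [← List.take_append_drop (rest.idxOf "\n") rest]
      rw [List.drop_eq_getElem_cons hlt, hget]
    rw [ihn _ hdec _ rfl]
    conv_rhs => rw [hsplit]
    rw [auxG_split _ (not_nl_take rest)]
    simp only [List.nil_append]
    by_cases hz : rest.idxOf "\n" = 0
    · simp [hz]
    · simp [hz]
      exact List.ne_nil_of_mem h
  · simp [h, auxG_no_nl rest h]

-- ===== VERDICT (by name: the statement is the Claim_ definition above) =====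
theorem sep_reg_spec : Claim_equal_sep_reg := by
  intro l _
  unfold Spec_sep_reg sep_reg sep_reg_alt
  rw [A_loop_char l [] [], altLoop_eq l []]
  simp only [List.nil_append, List.map_map]
  exact List.map_congr_left (fun g _ => mk_v_reg_items g)
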